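-- pv_equiv track=rewrite | github.com/Haippp/CTF-WriteUp | CTF-Learn/Polycrypto/polyToBinary.py | poly2binary
-- ===== SOURCE A (Python) =====
-- def poly2binary(poly: list, degre: int) -> str:
--     binary = ''
--
--     for i in range(degre, 0, -1):
--         test = 'x^' + str(i)
--
--         if test in poly:
--             binary += '1'
--         else:
--             binary += '0'
--
--     if '1' in poly:
--         binary += '1'
--
--     return binary
-- ===== SOURCE B (Python) =====
-- def poly2binary(poly: list, degre: int) -> str:
--     # Index every possible term once, then scatter the poly terms into a bit array.
--     pos = {}
--     for i in range(1, degre + 1):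
--         pos['x^' + str(i)] = degre - i
--     bits = ['0'] * degre
--     for t in poly:
--         j = pos.get(t)
--         if j is not None:
--             bits[j] = '1'
--     return ''.join(bits) + ('1' if '1' in poly else '')
-- ===== Notes on version B (the rewrite author's own statement) =====
-- stated objective: faster
-- what changed: Instead of scanning poly once for each degree (membership test per range step), B builds a dict from term string 'x^i' to bit position once, scatters the poly terms into a preallocated bit array in a single pass, and joins it; the constant-term quirk ('1' appended only when present) is kept.
import Mathlib
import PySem

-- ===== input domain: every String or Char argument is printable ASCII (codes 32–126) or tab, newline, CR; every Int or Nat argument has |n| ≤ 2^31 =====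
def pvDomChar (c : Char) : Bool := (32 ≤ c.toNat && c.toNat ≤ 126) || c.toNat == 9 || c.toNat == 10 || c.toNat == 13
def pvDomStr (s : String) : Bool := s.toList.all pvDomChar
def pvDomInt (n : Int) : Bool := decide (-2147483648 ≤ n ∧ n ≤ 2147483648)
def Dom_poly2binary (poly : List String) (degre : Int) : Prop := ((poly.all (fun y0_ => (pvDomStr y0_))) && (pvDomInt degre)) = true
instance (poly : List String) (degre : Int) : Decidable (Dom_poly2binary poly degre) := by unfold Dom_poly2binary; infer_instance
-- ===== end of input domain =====

-- B builds a dict from term 'x^i' to bit position once and scatters the poly terms into a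
-- bit array in a single pass, instead of scanning poly once per degree (objective: faster).
-- The Python str accumulator / list of 1-char strings is modelled exactly as List Char.

-- ===== PORT A =====
def poly2binary (poly : List String) (degre : Int) : String :=
  -- binary = ''; for i in range(degre, 0, -1): test = 'x^'+str(i); binary += '1' if test in poly else '0'
  let binary : List Char :=
    (PySem.List.pyRange degre 0 (-1)).foldl
      (fun binary i =>
        let test := "x^" ++ PySem.Int.toStr i
        if poly.contains test then binary ++ ['1'] else binary ++ ['0']) []
  -- if '1' in poly: binary += '1'
  let binary := if poly.contains "1" then binary ++ ['1'] else binary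
  String.ofList binary

-- ===== PORT B =====
def poly2binary_alt (poly : List String) (degre : Int) : String :=
  -- pos = {}; for i in range(1, degre+1): pos['x^'+str(i)] = degre - i
  let pos : PySem.Dict String Int :=
    (PySem.List.pyRange 1 (degre + 1)).foldl
      (fun d i => d.insert ("x^" ++ PySem.Int.toStr i) (degre - i)) PySem.Dict.empty
  -- bits = ['0'] * degre   (Python's list * clamps negative counts to 0, as toNat does)
  let bits : List Char := List.replicate degre.toNat '0'
  -- for t in poly: j = pos.get(t); if j is not None: bits[j] = '1'
  let bits := poly.foldl
    (fun bits t =>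
      match pos.get? t with
      | some j => PySem.List.pySetD bits j '1'
      | none => bits) bits
  -- return ''.join(bits) + ('1' if '1' in poly else '')
  String.ofList bits ++ (if poly.contains "1" then "1" else "")

-- ===== PRECONDITION & SPEC =====
def Spec_poly2binary (poly : List String) (degre : Int) (out : String) : Prop := out = poly2binary_alt poly degre
instance (poly : List String) (degre : Int) (out : String) : Decidable (Spec_poly2binary poly degre out) := by unfold Spec_poly2binary; infer_instance

-- ===== CLAIM (what is proved, stated in full; the proofs are below) =====
def Claim_equal_poly2binary : Prop := ∀ (poly : List String) (degre : Int), Dom_poly2binary poly degre → Spec_poly2binary poly degre (poly2binary poly degre)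

-- ===== LEMMAS AND PROOFS =====

-- digit value of a decimal character string
def pvVal (s : List Char) : Nat := s.foldl (fun a c => 10 * a + (c.toNat - 48)) 0

lemma pvDigitChar_toNat_sub (d : Nat) (h : d < 10) : (Nat.digitChar d).toNat - 48 = d := by
  interval_cases d <;> rfl

lemma pvToDigitsCore_append : ∀ (f n : Nat) (acc : List Char),
    Nat.toDigitsCore 10 f n acc = Nat.toDigitsCore 10 f n [] ++ acc := by
  intro f
  induction f with
  | zero => intro n acc; rfl
  | succ f ih =>
    intro n acc
    simp only [Nat.toDigitsCore]
    by_cases h : n / 10 = 0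
    · simp [h]
    · simp only [h]
      rw [ih (n / 10) (Nat.digitChar (n % 10) :: acc), ih (n / 10) [Nat.digitChar (n % 10)]]
      simp

lemma pvToDigitsCore_fuel : ∀ (f g n : Nat) (acc : List Char), n < f → n < g →
    Nat.toDigitsCore 10 f n acc = Nat.toDigitsCore 10 g n acc := by
  intro f
  induction f with
  | zero => intro g n acc h; omega
  | succ f ih =>
    intro g n acc hf hg
    cases g with
    | zero => omega
    | succ g =>
      simp only [Nat.toDigitsCore]
      by_cases h : n / 10 = 0
      · simp [h]
      · simp only [h]
        have hn : n / 10 < n := Nat.div_lt_self (by omega) (by omega)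
        exact ih g (n / 10) _ (by omega) (by omega)

lemma pvToDigits_lt (n : Nat) (h : n < 10) : Nat.toDigits 10 n = [Nat.digitChar n] := by
  have h0 : n / 10 = 0 := Nat.div_eq_of_lt h
  have hm : n % 10 = n := Nat.mod_eq_of_lt h
  simp [Nat.toDigits, Nat.toDigitsCore, h0, hm]

lemma pvToDigits_ge (n : Nat) (h : 10 ≤ n) :
    Nat.toDigits 10 n = Nat.toDigits 10 (n / 10) ++ [Nat.digitChar (n % 10)] := by
  have h0 : n / 10 ≠ 0 := by omega
  have hn : n / 10 < n := Nat.div_lt_self (by omega) (by omega)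
  show Nat.toDigitsCore 10 (n + 1) n [] = _
  simp only [Nat.toDigitsCore, h0]
  rw [pvToDigitsCore_append n (n / 10) [Nat.digitChar (n % 10)]]
  rw [pvToDigitsCore_fuel n (n / 10 + 1) (n / 10) [] (by omega) (by omega)]
  rfl

lemma pvVal_toDigits (n : Nat) : pvVal (Nat.toDigits 10 n) = n := by
  induction n using Nat.strong_induction_on with
  | _ n ih =>
    by_cases h : n < 10
    · rw [pvToDigits_lt n h]
      simp [pvVal, pvDigitChar_toNat_sub n h]
    · rw [pvToDigits_ge n (by omega)]
      have hn : n / 10 < n := Nat.div_lt_self (by omega) (by omega)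
      have := ih (n / 10) hn
      simp only [pvVal, List.foldl_append, List.foldl_cons, List.foldl_nil] at *
      rw [this, pvDigitChar_toNat_sub (n % 10) (Nat.mod_lt n (by omega))]
      omega

lemma pvKey_inj (i i' : Int) (hi : 0 ≤ i) (hi' : 0 ≤ i')
    (h : "x^" ++ PySem.Int.toStr i = "x^" ++ PySem.Int.toStr i') : i = i' := by
  have h2 := congrArg String.toList h
  simp only [String.toList_append, PySem.Int.toList_toStr, List.append_cancel_left_eq] at h2
  simp only [PySem.Int.toChars, if_neg (by omega : ¬ i < 0), if_neg (by omega : ¬ i' < 0)] at h2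
  have := congrArg pvVal h2
  rw [pvVal_toDigits, pvVal_toDigits] at this
  omega

-- the position dict built by B's first loop
def pvPos (degre : Int) : PySem.Dict String Int :=
  (PySem.List.pyRange 1 (degre + 1)).foldl
    (fun d i => d.insert ("x^" ++ PySem.Int.toStr i) (degre - i)) PySem.Dict.empty

lemma pvPos_items (degre : Int) :
    (pvPos degre).items =
      (PySem.List.pyRange 1 (degre + 1)).map (fun i => ("x^" ++ PySem.Int.toStr i, degre - i)) := by
  have := PySem.Dict.items_foldl_insert_fresh (PySem.List.pyRange 1 (degre + 1))
    (fun i => "x^" ++ PySem.Int.toStr i) (fun i => degre - i) PySem.Dict.empty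
    (fun a _ => PySem.Dict.contains_empty _)
    (List.Nodup.map_on
      (fun x hx y hy hxy => pvKey_inj x y
        (by have := PySem.List.mem_pyRange_one.mp hx; omega)
        (by have := PySem.List.mem_pyRange_one.mp hy; omega) hxy)
      (PySem.List.nodup_pyRange_one 1 (degre + 1)))
  simpa [pvPos] using this

lemma pvPos_keys_nodup (degre : Int) : (pvPos degre).keys.Nodup := by
  show ((pvPos degre).items.map (·.1)).Nodup
  rw [pvPos_items]
  rw [List.map_map]
  exact List.Nodup.map_on
    (fun x hx y hy hxy => pvKey_inj x y
      (by have := PySem.List.mem_pyRange_one.mp hx; omega)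
      (by have := PySem.List.mem_pyRange_one.mp hy; omega) hxy)
    (PySem.List.nodup_pyRange_one 1 (degre + 1))

lemma pvPos_get?_iff (degre : Int) (t : String) (j : Int) :
    (pvPos degre).get? t = some j ↔
      ∃ i, 1 ≤ i ∧ i < degre + 1 ∧ t = "x^" ++ PySem.Int.toStr i ∧ j = degre - i := by
  rw [PySem.Dict.get?_eq_some_iff_mem_items _ _ _ (pvPos_keys_nodup degre), pvPos_items]
  simp only [List.mem_map, Prod.mk.injEq]
  constructor
  · rintro ⟨i, hi, h1, h2⟩
    have := PySem.List.mem_pyRange_one.mp hi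
    exact ⟨i, this.1, this.2, h1.symm, h2.symm⟩
  · rintro ⟨i, h1, h2, h3, h4⟩
    exact ⟨i, PySem.List.mem_pyRange_one.mpr ⟨h1, h2⟩, h3.symm, h4.symm⟩

lemma pvPos_get?_nonneg (degre : Int) (t : String) (j : Int)
    (h : (pvPos degre).get? t = some j) : 0 ≤ j := by
  obtain ⟨i, h1, h2, _, h4⟩ := (pvPos_get?_iff degre t j).mp h
  omega

-- A's loop appends one character per position
lemma pvFoldl_append_if (l : List Int) (p : Int → Bool) : ∀ (acc : List Char),
    l.foldl (fun b i => if p i then b ++ ['1'] else b ++ ['0']) acc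
      = acc ++ l.map (fun i => if p i then '1' else '0') := by
  induction l with
  | nil => intro acc; simp
  | cons x l ih =>
    intro acc
    by_cases h : p x <;> simp [h, ih]

-- B's scatter loop, length
lemma pvScatter_length (g : String → Option Int) : ∀ (ps : List String) (bits : List Char),
    (ps.foldl (fun bs t => match g t with
      | some j => PySem.List.pySetD bs j '1'
      | none => bs) bits).length = bits.length := by
  intro ps
  induction ps with
  | nil => intro bits; rfl
  | cons t ps ih =>
    intro bits
    simp only [List.foldl_cons]
    rw [ih]
    cases hg : g t with
    | none => rfl
    | some j => exact PySem.List.length_pySetD bits j '1'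

-- B's scatter loop, pointwise
lemma pvScatter_getElem? (g : String → Option Int) (hg : ∀ t j, g t = some j → 0 ≤ j) :
    ∀ (ps : List String) (bits : List Char) (k : Nat),
    (ps.foldl (fun bs t => match g t with
      | some j => PySem.List.pySetD bs j '1'
      | none => bs) bits)[k]?
      = if ∃ t ∈ ps, g t = some (k : Int) then
          (if k < bits.length then some '1' else none)
        else bits[k]? := by
  intro ps
  induction ps with
  | nil => intro bits k; simp
  | cons t ps ih =>
    intro bits k
    simp only [List.foldl_cons]
    cases hgt : g t with
    | none =>
      rw [ih]
      have : (∃ u ∈ t :: ps, g u = some (k : Int)) ↔ (∃ u ∈ ps, g u = some (k : Int)) := by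
        constructor
        · rintro ⟨u, hu, h⟩
          rcases List.mem_cons.mp hu with rfl | hu
          · rw [hgt] at h; exact absurd h (by simp)
          · exact ⟨u, hu, h⟩
        · rintro ⟨u, hu, h⟩; exact ⟨u, List.mem_cons_of_mem _ hu, h⟩
      rw [if_congr this rfl rfl]
    | some j =>
      have hj : 0 ≤ j := hg t j hgt
      have hred : (match some j with
          | some j => PySem.List.pySetD bits j '1'
          | none => bits) = bits.set j.toNat '1' := PySem.List.pySetD_of_nonneg bits '1' hj
      rw [hred, ih, List.length_set]
      by_cases hps : ∃ u ∈ ps, g u = some (k : Int)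
      · have hcons : ∃ u ∈ t :: ps, g u = some (k : Int) :=
          ⟨hps.choose, List.mem_cons_of_mem _ hps.choose_spec.1, hps.choose_spec.2⟩
        rw [if_pos hps, if_pos hcons]
      · rw [if_neg hps]
        by_cases hjk : j = (k : Int)
        · have hjt : j.toNat = k := by omega
          have hcons : ∃ u ∈ t :: ps, g u = some (k : Int) :=
            ⟨t, List.mem_cons_self, by rw [hgt, hjk]⟩
          rw [if_pos hcons, List.getElem?_set, if_pos hjt, hjt]
        · have hcons : ¬ ∃ u ∈ t :: ps, g u = some (k : Int) := by
            rintro ⟨u, hu, h⟩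
            rcases List.mem_cons.mp hu with rfl | hu
            · rw [hgt] at h; exact hjk (Option.some.inj h)
            · exact hps ⟨u, hu, h⟩
          rw [if_neg hcons, List.getElem?_set, if_neg (by omega)]

-- B's bit array equals A's per-position indicator list
lemma pvBits (poly : List String) (degre : Int) :
    (poly.foldl (fun bits t => match (pvPos degre).get? t with
        | some j => PySem.List.pySetD bits j '1'
        | none => bits) (List.replicate degre.toNat '0'))
      = (List.range (degre - 0).toNat).map
          ((fun i => if poly.contains ("x^" ++ PySem.Int.toStr i) then '1' else '0')
            ∘ (fun k : Nat => degre - (k : Int))) := by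
  apply List.ext_getElem
  · rw [pvScatter_length]
    simp only [List.length_replicate, List.length_map, List.length_range]
    omega
  · intro k h1 h2
    have hk : k < degre.toNat := by
      rw [pvScatter_length, List.length_replicate] at h1
      exact h1
    have h := pvScatter_getElem? _ (pvPos_get?_nonneg degre) poly (List.replicate degre.toNat '0') k
    rw [List.getElem?_eq_getElem h1] at h
    simp only [List.length_replicate, if_pos hk, List.getElem?_replicate] at h
    rw [List.getElem_map, List.getElem_range, Function.comp_apply]
    have hiff : (∃ t ∈ poly, (pvPos degre).get? t = some (k : Int)) ↔
        ("x^" ++ PySem.Int.toStr (degre - (k : Int))) ∈ poly := by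
      constructor
      · rintro ⟨t, ht, hget⟩
        obtain ⟨i, hi1, hi2, h3, h4⟩ := (pvPos_get?_iff degre t _).mp hget
        have : i = degre - (k : Int) := by omega
        rw [h3, this] at ht
        exact ht
      · intro hmem
        refine ⟨_, hmem, ?_⟩
        rw [pvPos_get?_iff]
        exact ⟨degre - (k : Int), by omega, by omega, rfl, by omega⟩
    by_cases hmem : ("x^" ++ PySem.Int.toStr (degre - (k : Int))) ∈ poly
    · have hcm : poly.contains ("x^" ++ PySem.Int.toStr (degre - (k : Int))) = true := by
        simpa using hmem
      rw [if_pos (hiff.mpr hmem)] at h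
      rw [hcm, if_pos rfl]
      exact Option.some.inj h
    · have hcm : poly.contains ("x^" ++ PySem.Int.toStr (degre - (k : Int))) = false := by
        simpa using hmem
      rw [if_neg (fun hx => hmem (hiff.mp hx))] at h
      rw [hcm]
      exact Option.some.inj h

-- the two ports agree everywhere
lemma pvMain (poly : List String) (degre : Int) :
    poly2binary poly degre = poly2binary_alt poly degre := by
  simp only [poly2binary, poly2binary_alt]
  simp only [show (List.foldl (fun (d : PySem.Dict String Int) i =>
      d.insert ("x^" ++ PySem.Int.toStr i) (degre - i)) PySem.Dict.empty
      (PySem.List.pyRange 1 (degre + 1))) = pvPos degre from rfl]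
  rw [PySem.List.pyRange_neg_one, pvFoldl_append_if, List.nil_append, List.map_map,
    pvBits poly degre]
  cases hc : poly.contains "1" <;> simp

-- ===== VERDICT (by name: the statement is the Claim_ definition above) =====
theorem poly2binary_spec : Claim_equal_poly2binary := by
  intro poly degre _
  exact pvMain poly degre
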